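-- pv_equiv track=rewrite | github.com/isaqueveron/Library-Communication-Torque-Sensor | Send_Telegram.py | calc_checksums
-- ===== SOURCE A (Python) =====
-- def calc_checksums(tg: tuple[int]) -> tuple[int, int]:
--         """Generates checksums for the telegram.
--
--         Args:
--             tg (list[int]): The telegram data to calculate checksums from.
--
--         Returns:
--             tuple[int, int]: The calculated checksum and weighted checksum.
--         """
--         checksum = 0  # Initialize checksum
--         wchecksum = 0  # Initialize weighted checksum
--         for itm in tg:  # Iterate through telegram items
--             checksum += itm  # Add current item to checksum
--             checksum = checksum & 0xFF  # Ensure checksum fits in one byte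
--
--             wchecksum += checksum  # Add to weighted checksum
--             if wchecksum > 0xFF:  # Handle overflow
--                 wchecksum += 1
--             wchecksum = wchecksum & 0xFF  # Ensure wchecksum fits in one byte
--
--         return checksum, wchecksum  # Return calculated checksums
-- ===== SOURCE B (Python) =====
-- def calc_checksums(tg):
--     """Checksums via masked prefix sums and a closed-form end-around-carry sum."""
--     csums = []
--     s = 0
--     for itm in tg:
--         s = (s + itm) & 0xFF
--         csums.append(s)
--     checksum = csums[-1] if csums else 0
--     total = sum(csums)
--     wchecksum = 255 if total > 0 and total % 255 == 0 else total % 255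
--     return checksum, wchecksum
-- ===== Notes on version B (the rewrite author's own statement) =====
-- stated objective: alternative
-- what changed: A's single fused loop carrying both running checksums is replaced by a masked prefix-sum pass plus a closed-form ones'-complement (end-around-carry) formula for the weighted checksum: wchecksum = 255 if total>0 and total%255==0 else total%255, where total = sum of the masked prefix sums; the carry-branch fold disappears.
import Mathlib
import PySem

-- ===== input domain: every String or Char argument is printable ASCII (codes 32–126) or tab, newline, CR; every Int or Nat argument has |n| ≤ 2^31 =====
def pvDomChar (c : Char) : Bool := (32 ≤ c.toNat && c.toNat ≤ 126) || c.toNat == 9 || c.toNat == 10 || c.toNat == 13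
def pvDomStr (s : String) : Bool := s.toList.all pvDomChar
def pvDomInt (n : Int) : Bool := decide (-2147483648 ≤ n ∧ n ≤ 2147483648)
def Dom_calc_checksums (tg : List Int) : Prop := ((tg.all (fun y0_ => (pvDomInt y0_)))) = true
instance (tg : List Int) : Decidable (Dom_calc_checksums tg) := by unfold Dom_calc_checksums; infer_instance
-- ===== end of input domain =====

-- B replaces A's fused loop (running byte-checksum + end-around-carry weighted sum) by a
-- masked-prefix-sum pass followed by a closed-form ones'-complement sum (simpler decomposition).

-- ===== PORT A =====
def calc_checksums (tg : List Int) : Int × Int :=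
  tg.foldl
    (fun (st : Int × Int) itm =>
      let checksum := st.1 + itm            -- checksum += itm
      let checksum := PySem.Int.band checksum 0xFF
      let wchecksum := st.2 + checksum      -- wchecksum += checksum
      let wchecksum := if wchecksum > 0xFF then wchecksum + 1 else wchecksum
      (checksum, PySem.Int.band wchecksum 0xFF))
    ((0 : Int), (0 : Int))

-- ===== PORT B =====
def calc_checksums_alt (tg : List Int) : Int × Int :=
  let p := tg.foldl
    (fun (p : List Int × Int) itm =>
      let s := PySem.Int.band (p.2 + itm) 0xFF
      (p.1 ++ [s], s))
    (([] : List Int), (0 : Int))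
  let csums := p.1
  let checksum := csums.getLastD 0          -- csums[-1] if csums else 0
  let total := csums.foldl (· + ·) 0        -- sum(csums)
  let wchecksum :=
    if total > 0 ∧ PySem.Int.mod total 255 = 0 then (255 : Int) else PySem.Int.mod total 255
  (checksum, wchecksum)

-- ===== PRECONDITION & SPEC =====
def Spec_calc_checksums (tg : List Int) (out : Int × Int) : Prop := out = calc_checksums_alt tg
instance (tg : List Int) (out : Int × Int) : Decidable (Spec_calc_checksums tg out) := by unfold Spec_calc_checksums; infer_instance

-- ===== CLAIM (what is proved, stated in full; the proofs are below) =====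
def Claim_equal_calc_checksums : Prop := ∀ (tg : List Int), Dom_calc_checksums tg → Spec_calc_checksums tg (calc_checksums tg)

-- ===== LEMMAS AND PROOFS =====

-- Python's `x & 0xFF` is `x % 256` (also for negative x).
theorem pv_band_255 (x : Int) : PySem.Int.band x 255 = x % 256 := by
  have key : ∀ n : Nat, n &&& 255 = n % 256 := by
    intro n; have := Nat.and_two_pow_sub_one_eq_mod n 8; norm_num at this; omega
  unfold PySem.Int.band
  split_ifs with h1 h2 h2 <;> try norm_num at h2
  all_goals simp only [show (255:Int).toNat = 255 from rfl]
  all_goals first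
    | (rw [key]; omega)
    | (rw [Nat.and_comm, key]; omega)

-- Python's `x % 255` on Int.
theorem pv_mod_255 (x : Int) : PySem.Int.mod x 255 = x % 255 := by
  rw [PySem.Int.mod, Int.fmod_eq_emod]; simp

-- the masked prefix sums both loops compute
def pvCs (c : Int) : List Int → List Int
  | [] => []
  | i :: r => ((c + i) % 256) :: pvCs ((c + i) % 256) r

-- closed form of the end-around-carry weighted checksum as a function of sum of prefix sums
def pvW (S : Int) : Int := if S > 0 ∧ S % 255 = 0 then 255 else S % 255

theorem pvW_step (S c : Int) (hS : 0 ≤ S) (hc0 : 0 ≤ c) (hc : c ≤ 255) :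
    (if pvW S + c > 255 then pvW S + c + 1 else pvW S + c) % 256 = pvW (S + c) := by
  unfold pvW; split_ifs <;> omega

theorem pv_foldl_sum (l : List Int) (a : Int) : l.foldl (· + ·) a = a + l.sum := by
  induction l generalizing a with
  | nil => simp
  | cons x r ih => simp [List.foldl_cons, ih, List.sum_cons]; ring

theorem pv_getLastD_cons (a c : Int) (l : List Int) :
    (a :: l).getLast?.getD c = l.getLast?.getD a := by
  rw [← List.getLastD_eq_getLast?, ← List.getLastD_eq_getLast?, List.getLastD_cons]

theorem pv_foldA (tg : List Int) (c w S : Int) (hc0 : 0 ≤ c) (hc : c ≤ 255)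
    (hS : 0 ≤ S) (hw : w = pvW S) :
    tg.foldl
      (fun (st : Int × Int) itm =>
        let checksum := st.1 + itm
        let checksum := checksum % 256
        let wchecksum := st.2 + checksum
        let wchecksum := if wchecksum > 255 then wchecksum + 1 else wchecksum
        (checksum, wchecksum % 256))
      (c, w)
      = ((pvCs c tg).getLastD c, pvW (S + (pvCs c tg).sum)) := by
  induction tg generalizing c w S with
  | nil => simp [pvCs, hw]
  | cons i r ih =>
    have hc' : 0 ≤ (c + i) % 256 ∧ (c + i) % 256 ≤ 255 := by omega
    have hstep := pvW_step S ((c + i) % 256) hS hc'.1 hc'.2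
    simp only [List.foldl_cons, hw]
    rw [ih ((c + i) % 256) _ (S + (c + i) % 256) hc'.1 hc'.2 (by omega) (by rw [hstep])]
    simp [pvCs, List.sum_cons, pv_getLastD_cons]
    ring_nf

theorem pv_foldB (tg : List Int) (acc : List Int) (c : Int) :
    tg.foldl
      (fun (p : List Int × Int) itm =>
        let s := (p.2 + itm) % 256
        (p.1 ++ [s], s))
      (acc, c)
      = (acc ++ pvCs c tg, (pvCs c tg).getLastD c) := by
  induction tg generalizing acc c with
  | nil => simp [pvCs]
  | cons i r ih =>
    simp only [List.foldl_cons]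
    rw [ih]
    simp [pvCs, pv_getLastD_cons]

-- ===== VERDICT (by name: the statement is the Claim_ definition above) =====
theorem calc_checksums_spec : Claim_equal_calc_checksums := by
  intro tg _
  unfold Spec_calc_checksums calc_checksums calc_checksums_alt
  simp only [pv_band_255, pv_mod_255]
  rw [show (0xFF : Int) = 255 from rfl] at *
  rw [pv_foldA tg 0 0 0 le_rfl (by norm_num) le_rfl (by simp [pvW])]
  rw [pv_foldB tg [] 0]
  simp only [List.nil_append, pv_foldl_sum, zero_add]
  rfl
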